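-- pv_equiv track=rewrite | github.com/VladLevochko/tpr | lab4/lab.py | relative_majority
-- ===== SOURCE A (Python) =====
-- def get_candidates_with_max_votes(votes):
--     """
--     Returns list of candidates who have the most votes
--     :param votes: dict with candidates and votes for them
--     :return: list of candidates
--     """
--     candidates = []
--     max_votes = max(votes.values())
--     for candidate, votes in votes.items():
--         if votes == max_votes:
--             candidates.append(candidate)
--
--     return candidates
--
-- def relative_majority(election_matrix):
--     votes = {}
--     for candidates_order, votes_number in election_matrix.items():
--         candidate = candidates_order[0]
--         votes[candidate] = votes.get(candidate, 0) + votes_number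
--
--     winners = get_candidates_with_max_votes(votes)
--     if len(winners) > 1:
--         return "can't determine!"
--
--     return winners[0]
-- ===== SOURCE B (Python) =====
-- def relative_majority(election_matrix):
--     votes = {}
--     for candidates_order, votes_number in election_matrix.items():
--         candidate = candidates_order[0]
--         votes[candidate] = votes.get(candidate, 0) + votes_number
--     winner = None
--     top = 0
--     count = 0
--     for candidate, v in votes.items():
--         if count == 0 or v > top:
--             winner, top, count = candidate, v, 1
--         elif v == top:
--             count += 1
--     if count != 1:
--         return "can't determine!"
--     return winner
-- ===== Notes on version B (the rewrite author's own statement) =====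
-- stated objective: alternative
-- what changed: replaces A's two-phase decision (max over all vote values, then a second pass collecting the full winners list and checking its length) with a single pass over the tally that tracks the current winner, the top vote count and how many candidates tie it
import Mathlib
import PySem

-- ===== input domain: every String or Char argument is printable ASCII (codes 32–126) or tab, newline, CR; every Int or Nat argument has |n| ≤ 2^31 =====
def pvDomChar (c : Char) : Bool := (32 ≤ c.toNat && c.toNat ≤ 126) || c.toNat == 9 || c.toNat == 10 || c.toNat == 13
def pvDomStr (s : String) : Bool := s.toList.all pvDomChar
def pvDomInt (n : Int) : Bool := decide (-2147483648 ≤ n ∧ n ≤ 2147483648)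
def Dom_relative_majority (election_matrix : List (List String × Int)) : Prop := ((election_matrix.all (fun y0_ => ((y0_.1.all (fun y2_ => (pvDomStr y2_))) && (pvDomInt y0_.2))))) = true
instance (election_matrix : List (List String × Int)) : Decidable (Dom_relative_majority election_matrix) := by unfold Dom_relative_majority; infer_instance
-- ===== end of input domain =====

-- B replaces A's two-phase decision (max over the values, then collecting the whole winners list and
-- testing its length) with a single winner/top-votes/tie-count scan over the tally (alternative
-- decomposition, same asymptotic cost). Equal on every non-empty duplicate-free matrix of non-empty ballots.

-- shared first loop of BOTH programs: the first-choice tally 'votes' (this loop is identical in Source A and Source B)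
def pvTally (election_matrix : List (List String × Int)) : PySem.Dict String Int :=
  election_matrix.foldl
    (fun d p =>
      d.insert ((PySem.List.pyGet? p.1 0).getD "") (d.getD ((PySem.List.pyGet? p.1 0).getD "") 0 + p.2))
    PySem.Dict.empty

-- ===== PORT A =====
def get_candidates_with_max_votes (votes : PySem.Dict String Int) : List String :=
  let max_votes := (PySem.List.max? votes.values (fun v => v)).getD 0
  votes.items.foldl (fun cs p => if p.2 == max_votes then cs ++ [p.1] else cs) []

def relative_majority (election_matrix : List (List String × Int)) : String :=
  let votes := pvTally election_matrix
  let winners := get_candidates_with_max_votes votes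
  if winners.length > 1 then "can't determine!"
  else (PySem.List.pyGet? winners 0).getD ""

-- ===== PORT B =====
def pvScanStep (st : String × Int × Nat) (p : String × Int) : String × Int × Nat :=
  if st.2.2 == 0 || p.2 > st.2.1 then (p.1, p.2, 1)
  else if p.2 == st.2.1 then (st.1, st.2.1, st.2.2 + 1)
  else st

def relative_majority_alt (election_matrix : List (List String × Int)) : String :=
  let votes := pvTally election_matrix
  let st := votes.items.foldl pvScanStep ("", 0, 0)
  if st.2.2 ≠ 1 then "can't determine!" else st.1

-- ===== PRECONDITION & SPEC =====
-- Pre_ excludes: the empty matrix (A's max() raises ValueError), matrices containing an empty ballot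
-- (candidates_order[0] raises IndexError), and matrices whose ballot keys repeat — A's argument is a
-- dict, which cannot hold duplicate keys, so such lists do not correspond to any input of A.
def Pre_relative_majority (election_matrix : List (List String × Int)) : Prop :=
  election_matrix ≠ [] ∧ (∀ p ∈ election_matrix, p.1 ≠ []) ∧ (election_matrix.map Prod.fst).Nodup
instance (election_matrix : List (List String × Int)) : Decidable (Pre_relative_majority election_matrix) := by unfold Pre_relative_majority; infer_instance
def pvWitness_relative_majority : (List (List String × Int)) := [(["a"], 2), (["b"], 1)]

def Spec_relative_majority (election_matrix : List (List String × Int)) (out : String) : Prop := out = relative_majority_alt election_matrix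
instance (election_matrix : List (List String × Int)) (out : String) : Decidable (Spec_relative_majority election_matrix out) := by unfold Spec_relative_majority; infer_instance

-- ===== CLAIM (what is proved, stated in full; the proofs are below) =====
def Claim_equal_relative_majority : Prop := ∀ (election_matrix : List (List String × Int)), Dom_relative_majority election_matrix → Pre_relative_majority election_matrix → Spec_relative_majority election_matrix (relative_majority election_matrix)

-- ===== LEMMAS AND PROOFS =====
lemma pv_foldl_max_ge (s : List Int) (t : Int) : t ≤ s.foldl max t :=
  (PySem.List.le_foldl_max s t).1

lemma pv_scan_eq (l : List (String × Int)) (w : String) (t : Int) (c : Nat) (hc : c ≠ 0) :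
    l.foldl pvScanStep (w, t, c) =
      if (l.map Prod.snd).foldl max t = t
      then (w, t, c + (l.filter (fun p => p.2 == t)).length)
      else (((l.find? (fun p => p.2 == (l.map Prod.snd).foldl max t)).getD (w, t)).1,
            (l.map Prod.snd).foldl max t,
            (l.filter (fun p => p.2 == (l.map Prod.snd).foldl max t)).length) := by
  induction l generalizing w t c with
  | nil => simp
  | cons p r ih =>
    simp only [List.foldl_cons, List.map_cons, List.filter_cons, List.find?_cons]
    by_cases hgt : p.2 > t
    · have hstep : pvScanStep (w, t, c) p = (p.1, p.2, 1) := by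
        simp [pvScanStep, hgt]
      have hmax : max t p.2 = p.2 := by omega
      rw [hstep, ih p.1 p.2 1 one_ne_zero, hmax]
      have hM := pv_foldl_max_ge (r.map Prod.snd) p.2
      by_cases h1 : (r.map Prod.snd).foldl max p.2 = p.2
      · rw [if_pos h1, h1, if_neg (by omega : ¬ p.2 = t)]
        simp
        omega
      · rw [if_neg h1, if_neg (by omega : ¬ (r.map Prod.snd).foldl max p.2 = t)]
        have hne : ¬ (p.2 == (r.map Prod.snd).foldl max p.2) = true := by
          simp; omega
        -- find? succeeds in r since the max is attained there
        rcases PySem.List.foldl_max_mem (r.map Prod.snd) p.2 with h2 | h2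
        · exact absurd h2 h1
        · obtain ⟨q, hq, hq2⟩ := List.mem_map.mp h2
          have hfind : (r.find? (fun p' => p'.2 == (r.map Prod.snd).foldl max p.2)).isSome := by
            rw [List.find?_isSome]
            exact ⟨q, hq, by simp [hq2]⟩
          obtain ⟨q', hq'⟩ := Option.isSome_iff_exists.mp hfind
          simp [hne, hq']
    · have hle : p.2 ≤ t := by omega
      have hmax : max t p.2 = t := by omega
      by_cases heq : p.2 = t
      · have hstep : pvScanStep (w, t, c) p = (w, t, c + 1) := by
          simp [pvScanStep, heq, hc]
        rw [hstep, ih w t (c + 1) (Nat.succ_ne_zero c), hmax]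
        by_cases h1 : (r.map Prod.snd).foldl max t = t
        · rw [if_pos h1, if_pos h1]
          simp [heq]
          omega
        · rw [if_neg h1, if_neg h1]
          have hne : ¬ (p.2 == (r.map Prod.snd).foldl max t) = true := by
            have := pv_foldl_max_ge (r.map Prod.snd) t
            simp; omega
          simp [hne]
      · have hstep : pvScanStep (w, t, c) p = (w, t, c) := by
          simp [pvScanStep, hgt, heq, hc]
        rw [hstep, ih w t c hc, hmax]
        by_cases h1 : (r.map Prod.snd).foldl max t = t
        · rw [if_pos h1, if_pos h1]
          simp [heq]
        · rw [if_neg h1, if_neg h1]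
          have hne : ¬ (p.2 == (r.map Prod.snd).foldl max t) = true := by
            have := pv_foldl_max_ge (r.map Prod.snd) t
            simp; omega
          simp [hne]

lemma pv_tally_items_ne_nil (em : List (List String × Int)) (h : em ≠ []) :
    (pvTally em).items ≠ [] := by
  have hk : (pvTally em).keys =
      PySem.Set.update (PySem.Dict.empty : PySem.Dict String Int).keys
        (em.map (fun p => (PySem.List.pyGet? p.1 0).getD "")) := by
    unfold pvTally
    exact PySem.Dict.keys_foldl_insert_key em
      (fun p => (PySem.List.pyGet? p.1 0).getD "")
      (fun d p => d.getD ((PySem.List.pyGet? p.1 0).getD "") 0 + p.2) PySem.Dict.empty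
  intro hit
  have hkeys : (pvTally em).keys = [] := by
    simp only [PySem.Dict.keys, hit, List.map_nil]
  rw [hk] at hkeys
  cases em with
  | nil => exact h rfl
  | cons e r =>
    have hmem : ((PySem.List.pyGet? e.1 0).getD "") ∈
        PySem.Set.update (PySem.Dict.empty : PySem.Dict String Int).keys
          ((e :: r).map (fun p => (PySem.List.pyGet? p.1 0).getD "")) := by
      rw [PySem.Set.mem_update]
      right
      simp
    rw [hkeys] at hmem
    exact (List.not_mem_nil hmem).elim

-- the decision lemma: on any non-empty tally items list the two decision phases agree
lemma pv_decide_eq (l : List (String × Int)) (hl : l ≠ []) :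
    (let max_votes := (PySem.List.max? (l.map Prod.snd) (fun v => v)).getD 0
     let winners := l.foldl (fun cs p => if p.2 == max_votes then cs ++ [p.1] else cs) []
     if winners.length > 1 then "can't determine!"
     else (PySem.List.pyGet? winners 0).getD "") =
    (let st := l.foldl pvScanStep ("", 0, 0)
     if st.2.2 ≠ 1 then "can't determine!" else st.1) := by
  cases l with
  | nil => exact absurd rfl hl
  | cons p r =>
    have hmv : (PySem.List.max? ((p :: r).map Prod.snd) (fun v => v)).getD 0
        = (r.map Prod.snd).foldl max p.2 := by
      simp [PySem.List.max?_id_cons]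
    have hwin : ∀ m : Int, (p :: r).foldl (fun cs q => if q.2 == m then cs ++ [q.1] else cs) ([] : List String)
        = ((p :: r).filter (fun q => q.2 == m)).map Prod.fst := fun m => by
      simpa using PySem.List.foldl_append_if (l := p :: r) (p := fun q => q.2 == m) (f := Prod.fst) (acc := [])
    have hstep0 : (p :: r).foldl pvScanStep ("", 0, 0) = r.foldl pvScanStep (p.1, p.2, 1) := by
      simp [pvScanStep]
    simp only [hmv, hwin, hstep0, pv_scan_eq r p.1 p.2 1 one_ne_zero]
    have hMge : p.2 ≤ (r.map Prod.snd).foldl max p.2 := pv_foldl_max_ge (r.map Prod.snd) p.2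
    by_cases h1 : (r.map Prod.snd).foldl max p.2 = p.2
    · rw [if_pos h1, h1]
      have hfc : (p :: r).filter (fun q => q.2 == p.2) = p :: r.filter (fun q => q.2 == p.2) := by
        simp
      rw [hfc]
      simp only [List.map_cons, List.length_cons, List.length_map, ne_eq]
      split_ifs with h01 h02 h03 <;>
        first
        | rfl
        | (exfalso; omega)
        | simp [PySem.List.pyGet?, PySem.List.pyIdx?]
    · rw [if_neg h1]
      have hne : (p.2 == (r.map Prod.snd).foldl max p.2) = false := by simp; omega
      have hfc : (p :: r).filter (fun q => q.2 == (r.map Prod.snd).foldl max p.2)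
          = r.filter (fun q => q.2 == (r.map Prod.snd).foldl max p.2) := by
        simp [hne]
      rw [hfc]
      -- the max is attained in r, so the filtered list is non-empty
      rcases PySem.List.foldl_max_mem (r.map Prod.snd) p.2 with h2 | h2
      · exact absurd h2 h1
      · obtain ⟨q, hq, hq2⟩ := List.mem_map.mp h2
        have hqf : q ∈ r.filter (fun q' => q'.2 == (r.map Prod.snd).foldl max p.2) := by
          simp [List.mem_filter, hq, hq2]
        have hk1 : 1 ≤ (r.filter (fun q' => q'.2 == (r.map Prod.snd).foldl max p.2)).length :=
          List.length_pos_of_mem hqf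
        rw [← List.head?_filter]
        simp only [List.length_map, ne_eq]
        split_ifs with h01 h02 h03 <;>
          first
          | rfl
          | (exfalso; omega)
          | (obtain ⟨x, hx⟩ := List.length_eq_one_iff.mp (by omega :
               (r.filter (fun q' => q'.2 == (r.map Prod.snd).foldl max p.2)).length = 1)
             rw [hx]
             simp [PySem.List.pyGet?, PySem.List.pyIdx?])

-- ===== VERDICT (by name: the statement is the Claim_ definition above) =====
theorem relative_majority_spec : Claim_equal_relative_majority := by
  intro em _ hpre
  unfold Spec_relative_majority relative_majority relative_majority_alt get_candidates_with_max_votes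
  exact pv_decide_eq (pvTally em).items (pv_tally_items_ne_nil em hpre.1)
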